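-- pv_equiv track=rewrite | github.com/DanielFloresDeFrancisco/SD-JWT_python_TFG | src/utils.py | removing_whitespaces_pair_kv
-- ===== SOURCE A (Python) =====
-- def removing_whitespaces_pair_kv(input_str):
--     inside_string = False
--     compact_result = ""
--
--     for char in input_str:
--         if char == "'":
--             inside_string = not inside_string
--             compact_result += '"'
--         elif char in [' ', '\n', '\t'] and not inside_string:
--             continue
--         else:
--             compact_result += char
--     return compact_result
-- ===== SOURCE B (Python) =====
-- def removing_whitespaces_pair_kv(input_str):
--     # Split on single quotes: even-indexed parts are outside strings, odd-indexed inside.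
--     parts = input_str.split("'")
--     processed = []
--     for i, part in enumerate(parts):
--         if i % 2 == 0:
--             part = ''.join(ch for ch in part if ch not in (' ', '\n', '\t'))
--         processed.append(part)
--     return '"'.join(processed)
-- ===== Notes on version B (the rewrite author's own statement) =====
-- stated objective: idiomatic
-- what changed: Replaces A's char-by-char inside_string state machine by splitting on single quotes into segments, removing the three whitespace characters only from even-indexed (outside-quote) segments, and joining with double quotes to restore the quote positions.
import Mathlib
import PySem

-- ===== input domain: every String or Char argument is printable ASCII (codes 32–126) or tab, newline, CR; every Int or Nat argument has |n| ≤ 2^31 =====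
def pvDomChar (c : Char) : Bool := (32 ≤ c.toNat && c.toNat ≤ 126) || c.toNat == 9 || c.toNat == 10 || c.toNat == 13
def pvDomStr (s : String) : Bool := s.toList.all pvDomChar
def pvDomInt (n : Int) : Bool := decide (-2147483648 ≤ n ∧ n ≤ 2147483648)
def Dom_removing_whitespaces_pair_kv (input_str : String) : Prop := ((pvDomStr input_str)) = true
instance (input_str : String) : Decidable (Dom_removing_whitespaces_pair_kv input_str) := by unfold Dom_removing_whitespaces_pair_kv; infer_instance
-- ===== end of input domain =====

-- B replaces A's char-by-char state machine by split("'") / per-segment cleanup / '"'.join (idiomatic, same cost).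

-- ===== PORT A =====
-- state: (inside_string, compact_result); a char-by-char fold, as in A
def removing_whitespaces_pair_kv (input_str : String) : String :=
  let st := input_str.toList.foldl
    (fun (st : Bool × List Char) char =>
      if char == '\'' then (!st.1, st.2 ++ ['"'])
      else if (char == ' ' || char == '\n' || char == '\t') && !st.1 then st
      else (st.1, st.2 ++ [char]))
    (false, [])
  String.ofList st.2

-- ===== PORT B =====
-- ''.join(ch for ch in part if ch not in (' ', '\n', '\t'))
def pvCleanSeg (part : String) : String :=
  String.ofList (part.toList.filter (fun ch => !(ch == ' ' || ch == '\n' || ch == '\t')))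

def removing_whitespaces_pair_kv_alt (input_str : String) : String :=
  match PySem.Str.split? input_str "'" with
  | none => ""   -- unreachable: the separator "'" is nonempty
  | some parts =>
      PySem.Str.join "\"" ((PySem.List.enumerate parts).map
        (fun ip => if PySem.Int.mod ip.1 2 == 0 then pvCleanSeg ip.2 else ip.2))

-- ===== PRECONDITION & SPEC =====
def Spec_removing_whitespaces_pair_kv (input_str : String) (out : String) : Prop := out = removing_whitespaces_pair_kv_alt input_str
instance (input_str : String) (out : String) : Decidable (Spec_removing_whitespaces_pair_kv input_str out) := by unfold Spec_removing_whitespaces_pair_kv; infer_instance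

-- ===== CLAIM (what is proved, stated in full; the proofs are below) =====
def Claim_equal_removing_whitespaces_pair_kv : Prop := ∀ (input_str : String), Dom_removing_whitespaces_pair_kv input_str → Spec_removing_whitespaces_pair_kv input_str (removing_whitespaces_pair_kv input_str)

-- ===== LEMMAS AND PROOFS =====

-- the kept-character predicate
def pvKeep (ch : Char) : Bool := !(ch == ' ' || ch == '\n' || ch == '\t')

-- split a char list at every quote: (first segment, remaining segments)
def pvSplit : List Char → List Char × List (List Char)
  | [] => ([], [])
  | c :: cs =>
      let r := pvSplit cs
      if c = '\'' then ([], r.1 :: r.2) else (c :: r.1, r.2)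

def pvSeg (b : Bool) (p : List Char) : List Char := if b then p.filter pvKeep else p

-- alternately filter segments and join them with '"'; b = "filter this segment"
def pvProc (b : Bool) : List (List Char) → List Char
  | [] => []
  | [p] => pvSeg b p
  | p :: ps => pvSeg b p ++ '"' :: pvProc (!b) ps

-- A's loop body result, as a direct recursion
def pvGo (inside : Bool) : List Char → List Char
  | [] => []
  | c :: cs =>
      if c == '\'' then '"' :: pvGo (!inside) cs
      else if (c == ' ' || c == '\n' || c == '\t') && !inside then pvGo inside cs
      else c :: pvGo inside cs

theorem pvFoldl_eq_go (cs : List Char) (inside : Bool) (acc : List Char) :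
    (cs.foldl
      (fun (st : Bool × List Char) char =>
        if char == '\'' then (!st.1, st.2 ++ ['"'])
        else if (char == ' ' || char == '\n' || char == '\t') && !st.1 then st
        else (st.1, st.2 ++ [char]))
      (inside, acc)).2 = acc ++ pvGo inside cs := by
  induction cs generalizing inside acc with
  | nil => simp [pvGo]
  | cons c cs ih =>
      simp only [List.foldl_cons, pvGo]
      split_ifs with h1 h2
      · rw [ih]; simp
      · rw [ih]
      · rw [ih]; simp

theorem pvGo_eq_proc (cs : List Char) (inside : Bool) :
    pvGo inside cs = pvProc (!inside) ((pvSplit cs).1 :: (pvSplit cs).2) := by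
  induction cs generalizing inside with
  | nil => simp [pvGo, pvSplit, pvProc, pvSeg]
  | cons c cs ih =>
      by_cases hq : c = '\''
      · subst hq
        simp only [pvGo, pvSplit, beq_self_eq_true, if_pos]
        simp only [pvProc, pvSeg]
        rw [ih]
        simp
      · have hsp : pvSplit (c :: cs) = (c :: (pvSplit cs).1, (pvSplit cs).2) := by
          simp [pvSplit, hq]
        rw [hsp]
        by_cases hw : ((c == ' ' || c == '\n' || c == '\t') && !inside) = true
        · -- c is dropped: outside a string and whitespace
          have hin : inside = false := by
            rcases Bool.and_eq_true .. |>.mp hw with ⟨_, h2⟩; simpa using h2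
          subst hin
          have : pvGo false (c :: cs) = pvGo false cs := by
            simp only [pvGo]
            rw [if_neg (by simpa using hq), if_pos hw]
          rw [this, ih]
          have hkeep : pvKeep c = false := by
            have h1 := (Bool.and_eq_true _ _).mp hw |>.1
            simp only [pvKeep, h1, Bool.not_true]
          cases h : (pvSplit cs).2 with
          | nil => simp [pvProc, pvSeg, List.filter, hkeep]
          | cons q qs => simp [pvProc, pvSeg, List.filter, hkeep]
        · -- c is kept
          have : pvGo inside (c :: cs) = c :: pvGo inside cs := by
            simp only [pvGo]
            rw [if_neg (by simpa using hq), if_neg hw]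
          rw [this, ih]
          have hseg : pvSeg (!inside) (c :: (pvSplit cs).1) = c :: pvSeg (!inside) (pvSplit cs).1 := by
            cases inside with
            | true => simp [pvSeg]
            | false =>
                have hkeep : pvKeep c = true := by
                  simp only [Bool.not_false, Bool.and_true] at hw
                  simp [pvKeep, hw]
                simp [pvSeg, List.filter, hkeep]
          cases h : (pvSplit cs).2 with
          | nil => simp [pvProc, hseg]
          | cons q qs => simp [pvProc, hseg]

theorem pvSplitOnGo (fuel : Nat) (l cur : List Char) (acc : List (List Char))
    (h : l.length ≤ fuel) :
    PySem.Chars.splitOn.go ['\''] fuel l cur acc =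
      acc.reverse ++ ((cur.reverse ++ (pvSplit l).1) :: (pvSplit l).2) := by
  induction fuel generalizing l cur acc with
  | zero =>
      have hl : l = [] := by simpa using h
      subst hl
      simp [PySem.Chars.splitOn.go, pvSplit]
  | succ fuel ih =>
      cases l with
      | nil => simp [PySem.Chars.splitOn.go, pvSplit]
      | cons c rest =>
          rw [PySem.Chars.splitOn.go]
          by_cases hq : c = '\''
          · subst hq
            have hpre : List.isPrefixOf ['\''] ('\'' :: rest) = true := by
              simp [List.isPrefixOf]
            rw [if_pos hpre]
            rw [ih _ _ _ (by simpa using Nat.le_of_succ_le_succ (by simpa using h))]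
            simp [pvSplit]
          · have hpre : List.isPrefixOf ['\''] (c :: rest) = false := by
              simp [List.isPrefixOf]; exact fun hh => absurd hh.symm hq
            rw [if_neg (by simp [hpre])]
            rw [ih _ _ _ (by simpa using Nat.le_of_succ_le_succ (by simpa using h))]
            simp [pvSplit, hq]

theorem pvSplitOn_eq (cs : List Char) :
    PySem.Chars.splitOn cs ['\''] = (pvSplit cs).1 :: (pvSplit cs).2 := by
  rw [PySem.Chars.splitOn]
  rw [pvSplitOnGo _ _ _ _ (Nat.le_succ _)]
  simp

theorem pvModFlip (k : Int) :
    ((PySem.Int.mod (k + 1) 2 == 0) : Bool) = !(PySem.Int.mod k 2 == 0) := by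
  have h2 : (0 : Int) < 2 := by norm_num
  rw [PySem.Int.mod_eq_emod_of_pos h2, PySem.Int.mod_eq_emod_of_pos h2]
  by_cases h : k % 2 = 0
  · have : (k + 1) % 2 = 1 := by omega
    simp [h, this]
  · have : (k + 1) % 2 = 0 := by omega
    simp [h, this]

theorem pvJoin_eq_proc (k : Int) (ps : List (List Char)) :
    PySem.Chars.join ['"']
      ((PySem.List.enumerate ps k).map
        (fun ip => if PySem.Int.mod ip.1 2 == 0 then ip.2.filter pvKeep else ip.2))
      = pvProc (PySem.Int.mod k 2 == 0) ps := by
  induction ps generalizing k with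
  | nil => simp [PySem.List.enumerate, PySem.Chars.join, List.intercalate, pvProc]
  | cons p ps ih =>
      rw [PySem.List.enumerate_cons]
      cases ps with
      | nil =>
          simp only [show PySem.List.enumerate ([] : List (List Char)) (k + 1) = [] from rfl,
            List.map_cons, List.map_nil]
          have hjoin : ∀ x : List Char, PySem.Chars.join ['"'] [x] = x := by
            intro x; simp [PySem.Chars.join, List.intercalate, List.intersperse]
          rw [hjoin]
          cases hb : (PySem.Int.mod k 2 == 0) <;> simp [pvProc, pvSeg]
      | cons q qs =>
          have hj : ∀ (x y : List Char) (l : List (List Char)),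
              PySem.Chars.join ['"'] (x :: y :: l) = x ++ '"' :: PySem.Chars.join ['"'] (y :: l) := by
            intro x y l
            simp [PySem.Chars.join, List.intercalate, List.intersperse]
          rw [PySem.List.enumerate_cons]
          simp only [List.map_cons]
          rw [hj]
          have h1 := ih (k + 1)
          rw [PySem.List.enumerate_cons] at h1
          simp only [List.map_cons] at h1
          rw [h1, pvModFlip]
          cases hb : (PySem.Int.mod k 2 == 0) <;> simp [pvProc, pvSeg]

theorem pvEnumMap (L : List (List Char)) (k : Int) :
    PySem.List.enumerate (L.map String.ofList) k
      = (PySem.List.enumerate L k).map (fun ia => (ia.1, String.ofList ia.2)) := by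
  induction L generalizing k with
  | nil => simp [PySem.List.enumerate]
  | cons x xs ih => simp [PySem.List.enumerate_cons, ih]

-- ===== VERDICT (by name: the statement is the Claim_ definition above) =====
theorem removing_whitespaces_pair_kv_spec : Claim_equal_removing_whitespaces_pair_kv := by
  intro s _hd
  unfold Spec_removing_whitespaces_pair_kv
  unfold removing_whitespaces_pair_kv removing_whitespaces_pair_kv_alt
  have hsplit : PySem.Str.split? s "'" =
      some (((pvSplit s.toList).1 :: (pvSplit s.toList).2).map String.ofList) := by
    rw [PySem.Str.split?, PySem.Chars.split?]
    simp [pvSplitOn_eq, String.ofList]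
  rw [hsplit]
  simp only []
  rw [pvFoldl_eq_go s.toList false []]
  rw [List.nil_append, pvGo_eq_proc]
  rw [pvEnumMap]
  rw [PySem.Str.join]
  congr 1
  rw [List.map_map, List.map_map]
  have hfun : ∀ ia : Int × List Char,
      ((String.toList ∘ fun ip => if (PySem.Int.mod ip.1 2 == 0) = true then pvCleanSeg ip.2 else ip.2) ∘
        fun ia => (ia.1, String.ofList ia.2)) ia
      = (fun ip => if PySem.Int.mod ip.1 2 == 0 then ip.2.filter pvKeep else ip.2) ia := by
    intro ia
    by_cases hb : (PySem.Int.mod ia.1 2 == 0) = true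
    · simp only [Function.comp_apply, hb, if_true, pvCleanSeg, String.toList_ofList]
      rfl
    · simp only [Function.comp_apply, hb, Bool.false_eq_true, if_false, String.toList_ofList]
  rw [List.map_congr_left (fun ia _ => hfun ia)]
  rw [show "\"".toList = ['"'] from rfl, pvJoin_eq_proc 0]
  rfl
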